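-- pv_equiv track=rewrite | github.com/aleksandrlisitcyn/testflight1 | tools/update_changelog.py | build_unreleased_section
-- ===== SOURCE A (Python) =====
-- from typing import Dict, List
--
-- CATEGORY_MAP = [
--     ("feat", "Added"),
--     ("add", "Added"),
--     ("fix", "Fixed"),
--     ("bug", "Fixed"),
--     ("docs", "Changed"),
--     ("doc", "Changed"),
--     ("refactor", "Changed"),
--     ("chore", "Changed"),
--     ("perf", "Changed"),
-- ]
--
-- def categorise(message: str) -> str:
--     lower = message.lower()
--     for prefix, category in CATEGORY_MAP:
--         if lower.startswith(f"{prefix}:") or lower.startswith(f"{prefix}("):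
--             return category
--     return "Changed"
--
-- def normalise_message(message: str) -> str:
--     # Drop leading conventional-commit prefix if present.
--     if ":" in message.split(" ")[0]:
--         head, tail = message.split(":", 1)
--         if any(head.lower().startswith(prefix) for prefix, _ in CATEGORY_MAP):
--             return tail.strip().capitalize()
--     return message.strip().capitalize()
--
-- def build_unreleased_section(messages: List[str]) -> List[str]:
--     grouped: Dict[str, List[str]] = {"Added": [], "Changed": [], "Fixed": []}
--     for msg in messages:
--         category = categorise(msg)
--         if category not in grouped:
--             grouped[category] = []
--         cleaned = normalise_message(msg)
--         if cleaned not in grouped[category]: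
--             grouped[category].append(cleaned)
--
--     lines: List[str] = []
--     for category in ("Added", "Changed", "Fixed"):
--         lines.append(f"### {category}")
--         if grouped.get(category):
--             lines.extend(f"- {entry}" for entry in grouped[category])
--         else:
--             lines.append("- (no recent entries)")
--         lines.append("")
--     return lines
-- ===== SOURCE B (Python) =====
-- from typing import List
--
-- CATEGORY_MAP = [
--     ("feat", "Added"),
--     ("add", "Added"),
--     ("fix", "Fixed"),
--     ("bug", "Fixed"),
--     ("docs", "Changed"),
--     ("doc", "Changed"),
--     ("refactor", "Changed"),
--     ("chore", "Changed"),
--     ("perf", "Changed"),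
-- ]
--
-- def categorise(message: str) -> str:
--     lower = message.lower()
--     for prefix, category in CATEGORY_MAP:
--         if lower.startswith(f"{prefix}:") or lower.startswith(f"{prefix}("):
--             return category
--     return "Changed"
--
-- def normalise_message(message: str) -> str:
--     if ":" in message.split(" ")[0]:
--         head, tail = message.split(":", 1)
--         if any(head.lower().startswith(prefix) for prefix, _ in CATEGORY_MAP):
--             return tail.strip().capitalize()
--     return message.strip().capitalize()
--
-- def build_unreleased_section(messages: List[str]) -> List[str]:
--     lines: List[str] = []
--     for category in ("Added", "Changed", "Fixed"):
--         entries: List[str] = []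
--         for msg in messages:
--             if categorise(msg) == category:
--                 cleaned = normalise_message(msg)
--                 if cleaned not in entries:
--                     entries.append(cleaned)
--         lines.append(f"### {category}")
--         if entries:
--             lines.extend(f"- {e}" for e in entries)
--         else:
--             lines.append("- (no recent entries)")
--         lines.append("")
--     return lines
-- ===== Notes on version B (the rewrite author's own statement) =====
-- stated objective: alternative
-- what changed: Replaces A's two-pass design (build a category->entries dict over all messages, then a separate emit loop) with a single outer loop over the three fixed categories that rescans the messages per category, collecting deduplicated normalised entries and emitting that section immediately; no dict is built.
import Mathlib
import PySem

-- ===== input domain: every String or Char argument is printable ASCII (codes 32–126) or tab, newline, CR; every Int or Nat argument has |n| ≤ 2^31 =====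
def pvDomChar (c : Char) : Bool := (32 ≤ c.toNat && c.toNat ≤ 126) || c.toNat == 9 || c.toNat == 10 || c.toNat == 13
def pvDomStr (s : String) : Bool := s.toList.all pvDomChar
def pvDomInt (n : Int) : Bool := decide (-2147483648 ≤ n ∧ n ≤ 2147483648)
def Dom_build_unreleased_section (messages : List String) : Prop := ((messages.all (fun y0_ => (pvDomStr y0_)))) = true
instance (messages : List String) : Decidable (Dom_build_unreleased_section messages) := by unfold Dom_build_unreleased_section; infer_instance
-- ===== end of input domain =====

-- B inverts the loop nesting: one pass per fixed category over the messages, emitting each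
-- section as it is collected, instead of A's grouped-dict build pass + separate emit pass
-- (objective: alternative — same result, no dict).

-- ===== PORT A =====
def CATEGORY_MAP : List (String × String) :=
  [("feat", "Added"), ("add", "Added"), ("fix", "Fixed"), ("bug", "Fixed"),
   ("docs", "Changed"), ("doc", "Changed"), ("refactor", "Changed"),
   ("chore", "Changed"), ("perf", "Changed")]

def categoriseLoop (lower : String) : List (String × String) → String
  | [] => "Changed"
  | (pre, cat) :: rest =>
    if PySem.Str.startswith lower (pre ++ ":") || PySem.Str.startswith lower (pre ++ "(") then cat
    else categoriseLoop lower rest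

def categorise (message : String) : String :=
  categoriseLoop (PySem.Str.lower message) CATEGORY_MAP

-- str.capitalize = first char uppercased, rest lowercased (exact on the ASCII domain, where
-- title-casing the first character coincides with upper-casing it)
def pyCapitalize (s : String) : String :=
  match s.toList with
  | [] => ""
  | c :: rest => String.ofList (PySem.Chars.upperChar c :: PySem.Chars.lower rest)

def normalise_message (message : String) : String :=
  -- message.split(" ")[0]: split(" ") always yields a nonempty list, so [0] never raises
  let firstWord := ((PySem.Str.split? message " ").getD []).headD ""
  if PySem.Str.isIn ":" firstWord then
    -- ":" occurs in message here, so message.split(":", 1) has exactly two pieces and the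
    -- Python tuple unpacking 'head, tail = …' never raises
    let parts := (PySem.Str.splitMax? message ":" 1).getD []
    let head := parts.headD ""
    let tail := parts.getD 1 ""
    if CATEGORY_MAP.any (fun pc => PySem.Str.startswith (PySem.Str.lower head) pc.1) then
      pyCapitalize (PySem.Str.strip tail)
    else pyCapitalize (PySem.Str.strip message)
  else pyCapitalize (PySem.Str.strip message)

-- one iteration of A's grouping loop ('grouped[category]' is total: the key was just ensured)
def groupStep (g : PySem.Dict String (List String)) (msg : String) : PySem.Dict String (List String) :=
  let category := categorise msg
  let g := if g.contains category then g else g.insert category []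
  let cleaned := normalise_message msg
  if cleaned ∈ g.getD category [] then g else g.insert category (g.getD category [] ++ [cleaned])

def build_unreleased_section (messages : List String) : List String :=
  let grouped := messages.foldl groupStep
    (PySem.Dict.mk [("Added", []), ("Changed", []), ("Fixed", [])])
  ["Added", "Changed", "Fixed"].foldl (fun lines category =>
    let lines := lines ++ ["### " ++ category]
    let lines :=
      if grouped.getD category [] ≠ [] then
        lines ++ (grouped.getD category []).map (fun entry => "- " ++ entry)
      else lines ++ ["- (no recent entries)"]
    lines ++ [""]) []

-- ===== PORT B =====
-- one iteration of B's inner per-category scan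
def collectStep (category : String) (es : List String) (msg : String) : List String :=
  if categorise msg == category then
    let cleaned := normalise_message msg
    if cleaned ∈ es then es else es ++ [cleaned]
  else es

def build_unreleased_section_alt (messages : List String) : List String :=
  ["Added", "Changed", "Fixed"].foldl (fun lines category =>
    let entries := messages.foldl (collectStep category) []
    let lines := lines ++ ["### " ++ category]
    let lines :=
      if entries ≠ [] then lines ++ entries.map (fun entry => "- " ++ entry)
      else lines ++ ["- (no recent entries)"]
    lines ++ [""]) []

-- ===== PRECONDITION & SPEC =====
def Spec_build_unreleased_section (messages : List String) (out : List String) : Prop := out = build_unreleased_section_alt messages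
instance (messages : List String) (out : List String) : Decidable (Spec_build_unreleased_section messages out) := by unfold Spec_build_unreleased_section; infer_instance

-- ===== CLAIM (what is proved, stated in full; the proofs are below) =====
def Claim_equal_build_unreleased_section : Prop := ∀ (messages : List String), Dom_build_unreleased_section messages → Spec_build_unreleased_section messages (build_unreleased_section messages)

-- ===== LEMMAS AND PROOFS =====

-- categorise only ever returns one of the three fixed categories
lemma categorise_mem (m : String) :
    categorise m = "Added" ∨ categorise m = "Changed" ∨ categorise m = "Fixed" := by
  unfold categorise CATEGORY_MAP
  simp only [categoriseLoop]
  split_ifs <;> simp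

lemma contains_groupStep (g : PySem.Dict String (List String)) (m c : String)
    (h : g.contains c = true) : (groupStep g m).contains c = true := by
  unfold groupStep
  dsimp only
  split_ifs <;> simp [PySem.Dict.contains_insert, h]

lemma getD_groupStep (g : PySem.Dict String (List String)) (m cat : String)
    (hc : g.contains (categorise m) = true) :
    (groupStep g m).getD cat [] = collectStep cat (g.getD cat []) m := by
  unfold groupStep collectStep
  simp only [hc, if_true]
  by_cases he : categorise m = cat
  · subst he
    simp only [beq_self_eq_true, if_true]
    split_ifs with h1
    · rfl
    · simp
  · conv_rhs => rw [if_neg (show ¬((categorise m == cat) = true) by simpa using he)]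
    split_ifs with h1
    · rfl
    · rw [PySem.Dict.getD_insert]
      simp [Ne.symm he]

lemma foldl_getD (msgs : List String) (g : PySem.Dict String (List String)) (cat : String)
    (hA : g.contains "Added" = true) (hC : g.contains "Changed" = true)
    (hF : g.contains "Fixed" = true) :
    (msgs.foldl groupStep g).getD cat [] = msgs.foldl (collectStep cat) (g.getD cat []) := by
  induction msgs generalizing g with
  | nil => rfl
  | cons m rest ih =>
    have hc : g.contains (categorise m) = true := by
      rcases categorise_mem m with h | h | h <;> rw [h] <;> assumption
    simp only [List.foldl]
    rw [ih _ (contains_groupStep g m _ hA) (contains_groupStep g m _ hC)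
          (contains_groupStep g m _ hF), getD_groupStep g m cat hc]

-- ===== VERDICT (by name: the statement is the Claim_ definition above) =====
theorem build_unreleased_section_spec : Claim_equal_build_unreleased_section := by
  intro messages _
  show build_unreleased_section messages = build_unreleased_section_alt messages
  unfold build_unreleased_section build_unreleased_section_alt
  have h := fun cat => foldl_getD messages
    (PySem.Dict.mk [("Added", []), ("Changed", []), ("Fixed", [])]) cat
    (by decide) (by decide) (by decide)
  simp only [List.foldl]
  rw [h "Added", h "Changed", h "Fixed"]
  rfl
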